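-- pv_equiv track=rewrite | github.com/cels2022-9721-45774/Eatsplorer | chatbot_git/actions/actions.py | normalize_aspect
-- ===== SOURCE A (Python) =====
-- def normalize_aspect(raw: str) -> str:
--     """Map raw entity value to canonical aspect key."""
--     if not raw:
--         return None
--     raw = raw.lower().strip()
--     mappings = {
--         "food_quality": ["food quality", "food", "cuisine", "dishes", "taste", "flavors", "the food"],
--         "service":      ["service", "staff", "customer service", "hospitality", "waiters", "waiter", "servers"],
--         "ambiance":     ["ambiance", "atmosphere", "vibe", "decor", "environment", "setting", "place"],
--         "price_value":  ["price value", "price-to-value", "value for money", "value", "price",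
--                          "affordability", "budget", "cost"],
--     }
--     for key, synonyms in mappings.items():
--         if raw == key or raw in synonyms:
--             return key
--     return None
-- ===== SOURCE B (Python) =====
-- # Flat reverse-lookup table written out once: every synonym (and each
-- # canonical key itself) maps directly to its canonical aspect key.
-- _LOOKUP = {
--     "food_quality": "food_quality",
--     "food quality": "food_quality",
--     "food": "food_quality",
--     "cuisine": "food_quality",
--     "dishes": "food_quality",
--     "taste": "food_quality",
--     "flavors": "food_quality",
--     "the food": "food_quality",
--     "service": "service",
--     "staff": "service",
--     "customer service": "service",
--     "hospitality": "service",
--     "waiters": "service",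
--     "waiter": "service",
--     "servers": "service",
--     "ambiance": "ambiance",
--     "atmosphere": "ambiance",
--     "vibe": "ambiance",
--     "decor": "ambiance",
--     "environment": "ambiance",
--     "setting": "ambiance",
--     "place": "ambiance",
--     "price_value": "price_value",
--     "price value": "price_value",
--     "price-to-value": "price_value",
--     "value for money": "price_value",
--     "value": "price_value",
--     "price": "price_value",
--     "affordability": "price_value",
--     "budget": "price_value",
--     "cost": "price_value",
-- }
--
--
-- def normalize_aspect(raw: str) -> str:
--     """Map raw entity value to canonical aspect key."""
--     if not raw:
--         return None
--     return _LOOKUP.get(raw.lower().strip())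
-- ===== Notes on version B (the rewrite author's own statement) =====
-- stated objective: simpler
-- what changed: Replaced the per-call loop over (key, synonyms) buckets with an inner membership scan by a single flat reverse-lookup dict literal (each synonym and each canonical key maps directly to its key), so the call is one hash lookup and the grouped table disappears.
import Mathlib
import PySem

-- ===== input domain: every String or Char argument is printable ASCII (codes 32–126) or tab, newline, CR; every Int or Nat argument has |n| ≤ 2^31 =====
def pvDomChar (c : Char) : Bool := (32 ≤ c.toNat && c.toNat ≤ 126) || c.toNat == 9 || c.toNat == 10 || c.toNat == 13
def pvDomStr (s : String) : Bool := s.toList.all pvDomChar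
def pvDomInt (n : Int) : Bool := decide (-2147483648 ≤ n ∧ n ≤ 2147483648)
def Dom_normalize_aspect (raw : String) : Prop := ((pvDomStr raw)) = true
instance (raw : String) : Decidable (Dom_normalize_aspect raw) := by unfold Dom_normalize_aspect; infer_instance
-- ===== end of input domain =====

-- B replaces A's per-bucket loop with an inner membership scan by one flat reverse-lookup dict literal (synonym -> key); simpler single lookup.

-- ===== PORT A =====
def aspectMappings : List (String × List String) :=
  [("food_quality", ["food quality", "food", "cuisine", "dishes", "taste", "flavors", "the food"]),
   ("service",      ["service", "staff", "customer service", "hospitality", "waiters", "waiter", "servers"]),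
   ("ambiance",     ["ambiance", "atmosphere", "vibe", "decor", "environment", "setting", "place"]),
   ("price_value",  ["price value", "price-to-value", "value for money", "value", "price",
                     "affordability", "budget", "cost"])]

-- the 'for key, synonyms in mappings.items()' loop with its early return
def aspectFindKey (s : String) : List (String × List String) → Option String
  | [] => none
  | (key, synonyms) :: rest =>
      if s = key ∨ s ∈ synonyms then some key else aspectFindKey s rest

def normalize_aspect (raw : String) : Option String :=
  if raw = "" then none
  else aspectFindKey (PySem.Str.strip (PySem.Str.lower raw)) aspectMappings

-- ===== PORT B =====
-- the flat dict literal _LOOKUP (all keys distinct)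
def aspectLookup : PySem.Dict String String :=
  PySem.Dict.mk
    [("food_quality", "food_quality"),
     ("food quality", "food_quality"),
     ("food", "food_quality"),
     ("cuisine", "food_quality"),
     ("dishes", "food_quality"),
     ("taste", "food_quality"),
     ("flavors", "food_quality"),
     ("the food", "food_quality"),
     ("service", "service"),
     ("staff", "service"),
     ("customer service", "service"),
     ("hospitality", "service"),
     ("waiters", "service"),
     ("waiter", "service"),
     ("servers", "service"),
     ("ambiance", "ambiance"),
     ("atmosphere", "ambiance"),
     ("vibe", "ambiance"),
     ("decor", "ambiance"),
     ("environment", "ambiance"),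
     ("setting", "ambiance"),
     ("place", "ambiance"),
     ("price_value", "price_value"),
     ("price value", "price_value"),
     ("price-to-value", "price_value"),
     ("value for money", "price_value"),
     ("value", "price_value"),
     ("price", "price_value"),
     ("affordability", "price_value"),
     ("budget", "price_value"),
     ("cost", "price_value")]

def normalize_aspect_alt (raw : String) : Option String :=
  if raw = "" then none
  else aspectLookup.get? (PySem.Str.strip (PySem.Str.lower raw))

-- ===== PRECONDITION & SPEC =====
def Spec_normalize_aspect (raw : String) (out : Option String) : Prop := out = normalize_aspect_alt raw
instance (raw : String) (out : Option String) : Decidable (Spec_normalize_aspect raw out) := by unfold Spec_normalize_aspect; infer_instance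

-- ===== CLAIM =====
def Claim_equal_normalize_aspect : Prop := ∀ (raw : String), Dom_normalize_aspect raw → Spec_normalize_aspect raw (normalize_aspect raw)

-- ===== LEMMAS AND PROOFS =====

-- aspectMappings with the redundant self-synonyms ("service", "ambiance") dropped:
-- removing a later duplicate key never changes a first-match scan
def aspectMappings' : List (String × List String) :=
  [("food_quality", ["food quality", "food", "cuisine", "dishes", "taste", "flavors", "the food"]),
   ("service",      ["staff", "customer service", "hospitality", "waiters", "waiter", "servers"]),
   ("ambiance",     ["atmosphere", "vibe", "decor", "environment", "setting", "place"]),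
   ("price_value",  ["price value", "price-to-value", "value for money", "value", "price",
                     "affordability", "budget", "cost"])]

lemma aspectLookup_eq :
    aspectLookup = PySem.Dict.mk
      (aspectMappings'.flatMap (fun p => (p.1 :: p.2).map (fun y => (y, p.1)))) := by
  decide

lemma findKey_dedup (s : String) :
    aspectFindKey s aspectMappings = aspectFindKey s aspectMappings' := by
  by_cases h1 : s = "service"
  · subst h1; decide
  · by_cases h2 : s = "ambiance"
    · subst h2; decide
    · simp only [aspectMappings, aspectMappings', aspectFindKey, List.mem_cons,
        List.not_mem_nil, or_false, h1, h2, false_or]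

lemma lookup_syns (s k : String) (ys : List String) (L : List (String × String)) :
    (PySem.Dict.mk (ys.map (fun y => (y, k)) ++ L)).get? s
      = if s ∈ ys then some k else (PySem.Dict.mk L).get? s := by
  induction ys with
  | nil => simp
  | cons a tl ih =>
      simp only [List.map_cons, List.cons_append, PySem.Dict.get?_mk_cons, ih, List.mem_cons]
      by_cases h : s = a
      · simp [h]
      · simp [h, Ne.symm h]

lemma findKey_eq_flat (s : String) (M : List (String × List String)) :
    aspectFindKey s M
      = (PySem.Dict.mk (M.flatMap (fun p => (p.1 :: p.2).map (fun y => (y, p.1))))).get? s := by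
  induction M with
  | nil => simp [aspectFindKey, PySem.Dict.get?]
  | cons p rest ih =>
      obtain ⟨k, syns⟩ := p
      simp only [aspectFindKey, List.flatMap_cons, lookup_syns, List.mem_cons, ih]

-- ===== VERDICT =====
theorem normalize_aspect_spec : Claim_equal_normalize_aspect := by
  intro raw _
  unfold Spec_normalize_aspect normalize_aspect normalize_aspect_alt
  by_cases h : raw = ""
  · simp [h]
  · simp only [h, ite_false]
    rw [aspectLookup_eq, findKey_dedup, findKey_eq_flat]
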